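-- pv_equiv track=rewrite | github.com/ghmulti/advent | day9/day9.py | search_invalid_numbers
-- ===== SOURCE A (Python) =====
-- from itertools import combinations
--
-- def search_invalid_numbers(nums, limit):
--     for index,number in enumerate(nums[limit:]):
--         prev_nums = nums[index:index+limit]
--         comb_prev_nums = combinations(prev_nums, 2)
--         comb_sum = (sum(e) for e in comb_prev_nums)
--         result = any(e for e in comb_sum if e == number)
--         if not result:
--             yield [index, number]
-- ===== SOURCE B (Python) =====
-- def search_invalid_numbers(nums, limit):
--     # Single-pass two-sum per window: keep a set of elements seen so far and
--     # test number - x membership, instead of summing all 2-combinations.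
--     for index, number in enumerate(nums[limit:]):
--         seen = set()
--         found = False
--         for x in nums[index:index + limit]:
--             if number - x in seen:
--                 found = True
--                 break
--             seen.add(x)
--         if not found:
--             yield [index, number]
-- ===== Notes on version B (the rewrite author's own statement) =====
-- stated objective: faster
-- what changed: Replaces the per-window quadratic scan over all 2-combinations with a single-pass two-sum using a 'seen' set.
-- intended difference: When a number equals 0 and its preceding window does contain two elements summing to 0, A still yields [index, 0] (its any() iterates only falsy zeros), while B correctly omits it, which is the intended two-sum semantics. — e.g. on search_invalid_numbers([1, -1, 0], 2): A returns [[0, 0]], B returns []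
import Mathlib
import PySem

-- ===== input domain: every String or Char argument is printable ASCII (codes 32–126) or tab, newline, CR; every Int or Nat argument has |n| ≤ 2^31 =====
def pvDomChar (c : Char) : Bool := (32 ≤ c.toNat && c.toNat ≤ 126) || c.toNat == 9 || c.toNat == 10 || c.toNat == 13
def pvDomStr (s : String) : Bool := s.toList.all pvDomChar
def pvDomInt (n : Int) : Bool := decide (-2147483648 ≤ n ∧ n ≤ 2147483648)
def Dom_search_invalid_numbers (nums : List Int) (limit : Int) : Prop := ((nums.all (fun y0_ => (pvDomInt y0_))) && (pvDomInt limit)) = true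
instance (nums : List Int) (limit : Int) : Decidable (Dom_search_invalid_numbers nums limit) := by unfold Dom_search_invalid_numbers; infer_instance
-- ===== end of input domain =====

-- B replaces A's per-window quadratic combinations scan with a one-pass two-sum using a seen-set;
-- on windows where 0 is expressible as a pair sum A still yields the 0 (any() over zeros is falsy), B omits it (D_ below).


-- ===== PORT A =====
-- combinations(l, 2) in itertools order: pairs (l[i], l[j]) with i < j
def combo2 : List Int → List (Int × Int)
  | [] => []
  | x :: rest => rest.map (fun y => (x, y)) ++ combo2 rest

-- the generator loop: for (index, number) in enumerate(nums[limit:])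
def aGo (nums : List Int) (limit : Int) : List (Int × Int) → List (List Int)
  | [] => []
  | (index, number) :: rest =>
      let prev_nums := PySem.List.slice nums (some index) (some (index + limit))
      let comb_sum := (combo2 prev_nums).map (fun p => p.1 + p.2)
      -- any(e for e in comb_sum if e == number): truthiness of the matching elements
      let result := (comb_sum.filter (fun e => e == number)).any (fun e => !(e == 0))
      if !result then [index, number] :: aGo nums limit rest
      else aGo nums limit rest

def search_invalid_numbers (nums : List Int) (limit : Int) : List (List Int) :=
  aGo nums limit (PySem.List.enumerate (PySem.List.slice nums (some limit) none) 0)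

-- ===== PORT B =====
-- one-pass two-sum: True iff some element has (number - element) among the earlier elements
def twoSumScan (number : Int) (seen : PySem.Set Int) : List Int → Bool
  | [] => false
  | x :: rest =>
      if PySem.Set.contains seen (number - x) then true
      else twoSumScan number (PySem.Set.add seen x) rest

def bGo (nums : List Int) (limit : Int) (index : Int) : List Int → List (List Int)
  | [] => []
  | number :: rest =>
      let found := twoSumScan number PySem.Set.empty
        (PySem.List.slice nums (some index) (some (index + limit)))
      if !found then [index, number] :: bGo nums limit (index + 1) rest
      else bGo nums limit (index + 1) rest

def search_invalid_numbers_alt (nums : List Int) (limit : Int) : List (List Int) :=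
  bGo nums limit 0 (PySem.List.slice nums (some limit) none)

-- ===== PRECONDITION & SPEC =====
-- On inputs where some number of the scanned suffix is 0 and its preceding window contains two
-- (position-distinct) elements summing to 0, A still yields [index, 0] (its any() iterates only
-- falsy zeros) while B omits it, which is the intended not-expressible-as-a-pair-sum semantics.
def D_search_invalid_numbers (nums : List Int) (limit : Int) : Prop :=
  let t := PySem.List.slice nums (some limit) none
  ∃ i < t.length, t.getD i 1 = 0 ∧
    let w := PySem.List.slice nums (some (i : Int)) (some ((i : Int) + limit))
    ∃ x ∈ w, -x ∈ w.erase x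
instance (nums : List Int) (limit : Int) : Decidable (D_search_invalid_numbers nums limit) := by
  unfold D_search_invalid_numbers; infer_instance

def Spec_search_invalid_numbers (nums : List Int) (limit : Int) (out : List (List Int)) : Prop :=
  ¬ D_search_invalid_numbers nums limit → out = search_invalid_numbers_alt nums limit
instance (nums : List Int) (limit : Int) (out : List (List Int)) : Decidable (Spec_search_invalid_numbers nums limit out) := by
  unfold Spec_search_invalid_numbers; infer_instance

def pvDiffWitness_search_invalid_numbers : List Int × Int := ([1, -1, 0], 2)
def pvDiffWitnessOut_search_invalid_numbers : (List (List Int)) × (List (List Int)) := ([[0, 0]], [])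

-- ===== CLAIM (what is proved, stated in full; the proofs are below) =====
def Claim_unchanged_search_invalid_numbers : Prop := ∀ (nums : List Int) (limit : Int), Dom_search_invalid_numbers nums limit → Spec_search_invalid_numbers nums limit (search_invalid_numbers nums limit)
def Claim_changed_search_invalid_numbers : Prop := Dom_search_invalid_numbers (pvDiffWitness_search_invalid_numbers.1) (pvDiffWitness_search_invalid_numbers.2) ∧ D_search_invalid_numbers (pvDiffWitness_search_invalid_numbers.1) (pvDiffWitness_search_invalid_numbers.2) ∧ search_invalid_numbers (pvDiffWitness_search_invalid_numbers.1) (pvDiffWitness_search_invalid_numbers.2) = pvDiffWitnessOut_search_invalid_numbers.1 ∧ search_invalid_numbers_alt (pvDiffWitness_search_invalid_numbers.1) (pvDiffWitness_search_invalid_numbers.2) = pvDiffWitnessOut_search_invalid_numbers.2 ∧ pvDiffWitnessOut_search_invalid_numbers.1 ≠ pvDiffWitnessOut_search_invalid_numbers.2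
def Claim_exact_search_invalid_numbers : Prop := ∀ (nums : List Int) (limit : Int), Dom_search_invalid_numbers nums limit → D_search_invalid_numbers nums limit → search_invalid_numbers nums limit ≠ search_invalid_numbers_alt nums limit

-- ===== LEMMAS AND PROOFS =====

-- does the list contain two (position-distinct) elements summing to 0?
def zeroPairScan : List Int → Bool
  | [] => false
  | x :: rest => rest.contains (-x) || zeroPairScan rest

-- the Python any(...)-with-filter truthiness: true iff number is a nonzero member of l
theorem filter_any_eq (l : List Int) (n : Int) :
    ((l.filter (fun e => e == n)).any (fun e => !(e == 0))) = (!(n == 0) && l.contains n) := by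
  induction l with
  | nil => simp
  | cons x xs ih =>
      rcases eq_or_ne x n with rfl | h
      · simp [ih]; tauto
      · simp [ih, h, Ne.symm h]

-- the two-sum scan finds number iff it is a pair-sum of the list (or hits the seeded set)
theorem twoSumScan_iff (n : Int) (w : List Int) : ∀ (seen : PySem.Set Int),
    twoSumScan n seen w = true ↔
      ((∃ x ∈ w, (n - x) ∈ seen) ∨ n ∈ (combo2 w).map (fun p => p.1 + p.2)) := by
  induction w with
  | nil => intro seen; simp [twoSumScan, combo2]
  | cons x rest ih =>
      intro seen
      simp only [twoSumScan, combo2]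
      by_cases h : PySem.Set.contains seen (n - x)
      · simp only [h, if_pos]
        constructor
        · intro _; left; exact ⟨x, by simp, by simpa [PySem.Set.contains] using h⟩
        · intro _; trivial
      · rw [if_neg h, ih]
        have hmem : (n - x) ∉ seen := by simpa [PySem.Set.contains] using h
        constructor
        · rintro (⟨y, hy, hys⟩ | hp)
          · rcases (PySem.Set.mem_add ..).mp hys with hys' | hys'
            · exact Or.inl ⟨y, List.mem_cons_of_mem _ hy, hys'⟩
            · right
              rw [List.map_append, List.mem_append]
              exact Or.inl (List.mem_map.mpr ⟨(x, y), List.mem_map.mpr ⟨y, hy, rfl⟩, by omega⟩)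
          · right; simp only [List.map_append, List.mem_append]; right; exact hp
        · rintro (⟨y, hy, hys⟩ | hp)
          · rcases List.mem_cons.mp hy with rfl | hy'
            · exact absurd hys hmem
            · exact Or.inl ⟨y, hy', (PySem.Set.mem_add ..).mpr (Or.inl hys)⟩
          · simp only [List.map_append, List.mem_append] at hp
            rcases hp with hp | hp
            · rcases List.mem_map.mp hp with ⟨p, hpmem, hpsum⟩
              rcases List.mem_map.mp hpmem with ⟨y, hy, rfl⟩
              exact Or.inl ⟨y, hy, (PySem.Set.mem_add ..).mpr (Or.inr (by omega))⟩
            · exact Or.inr hp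

-- zeroPairScan computes membership of 0 among the pair sums
theorem zeroPair_eq (w : List Int) :
    zeroPairScan w = (((combo2 w).map (fun p => p.1 + p.2)).contains 0) := by
  induction w with
  | nil => simp [zeroPairScan, combo2]
  | cons x r ih =>
      have ih' : zeroPairScan r = true ↔ ∃ a ∈ combo2 r, a.1 + a.2 = 0 := by rw [ih]; simp
      rw [Bool.eq_iff_iff]
      simp only [zeroPairScan, combo2, List.map_append, List.map_map, Bool.or_eq_true,
        List.contains_eq_mem, List.mem_append, List.mem_map, decide_eq_true_eq,
        Function.comp, ih']
      constructor
      · rintro (h | h)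
        · exact Or.inl ⟨-x, h, by omega⟩
        · exact Or.inr h
      · rintro (⟨y, hy, hy0⟩ | h)
        · refine Or.inl ?_
          have hyx : -x = y := by omega
          rw [hyx]; exact hy
        · exact Or.inr h

-- zeroPairScan decides the zero-pair condition used by D_
theorem zeroPair_iff (w : List Int) :
    zeroPairScan w = true ↔ ∃ x ∈ w, -x ∈ w.erase x := by
  induction w with
  | nil => simp [zeroPairScan]
  | cons a r ih =>
      simp only [zeroPairScan, Bool.or_eq_true, List.contains_eq_mem, decide_eq_true_eq, ih]
      constructor
      · rintro (h | ⟨x, hx, hex⟩)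
        · refine ⟨a, List.mem_cons_self, ?_⟩
          rwa [List.erase_cons_head]
        · rcases eq_or_ne x a with rfl | hxa
          · refine ⟨x, List.mem_cons_self, ?_⟩
            rw [List.erase_cons_head]
            exact List.mem_of_mem_erase hex
          · refine ⟨x, List.mem_cons_of_mem _ hx, ?_⟩
            rw [List.erase_cons_tail (by simpa using fun h => hxa h.symm)]
            exact List.mem_cons_of_mem _ hex
      · rintro ⟨x, hx, hex⟩
        rcases eq_or_ne x a with rfl | hxa
        · rw [List.erase_cons_head] at hex
          exact Or.inl hex
        · have hx' : x ∈ r := by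
            rcases List.mem_cons.mp hx with h | h
            · exact absurd h hxa
            · exact h
          rw [List.erase_cons_tail (by simpa using fun h => hxa h.symm)] at hex
          rcases List.mem_cons.mp hex with hax | hex'
          · refine Or.inl ?_
            have hax' : -a = x := by omega
            exact hax' ▸ hx'
          · exact Or.inr ⟨x, hx', hex'⟩

-- twoSumScan from the empty set is pair-sum membership
theorem twoSumScan_empty (n : Int) (w : List Int) :
    twoSumScan n PySem.Set.empty w = (((combo2 w).map (fun p => p.1 + p.2)).contains n) := by
  rw [Bool.eq_iff_iff, twoSumScan_iff]
  simp [PySem.Set.empty]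

-- per-element agreement of the two loop bodies outside D_, lifted over the whole tail
theorem aGo_eq_bGo (nums : List Int) (limit : Int) (t : List Int) : ∀ (i : ℕ),
    (∀ k : ℕ, k < t.length →
      ¬(t.getD k 1 = 0 ∧
        zeroPairScan (PySem.List.slice nums (some ((i + k : ℕ) : Int)) (some (((i + k : ℕ) : Int) + limit))) = true)) →
    aGo nums limit (PySem.List.enumerate t (i : Int)) = bGo nums limit (i : Int) t := by
  induction t with
  | nil => intro i _; simp [PySem.List.enumerate_nil, aGo, bGo]
  | cons number rest ih =>
      intro i h
      rw [PySem.List.enumerate_cons]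
      simp only [aGo, bGo]
      have hrec : aGo nums limit (PySem.List.enumerate rest ((i : Int) + 1)) = bGo nums limit ((i : Int) + 1) rest := by
        have := ih (i + 1) (fun k hk => by
          have := h (k + 1) (by simpa using Nat.succ_lt_succ hk)
          simpa [Nat.add_assoc, Nat.add_comm 1 k] using this)
        simpa [Nat.cast_add] using this
      rw [hrec]
      congr 1
      rw [filter_any_eq, twoSumScan_empty]
      rcases eq_or_ne number 0 with rfl | hne
      · have h0 := h 0 (by simp)
        simp only [List.getD_cons_zero, Nat.add_zero] at h0
        have hz : zeroPairScan (PySem.List.slice nums (some (i : Int)) (some ((i : Int) + limit))) = false := by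
          cases hb : zeroPairScan (PySem.List.slice nums (some (i : Int)) (some ((i : Int) + limit))) with
          | false => rfl
          | true => exact absurd ⟨by simp, hb⟩ h0
        rw [zeroPair_eq] at hz
        rw [hz]
        decide
      · simp [hne]

-- length of the A-loop output as a countP over the enumerated tail
def pA (nums : List Int) (limit : Int) (p : Int × Int) : Bool :=
  !((((combo2 (PySem.List.slice nums (some p.1) (some (p.1 + limit)))).map (fun q => q.1 + q.2)).filter
      (fun e => e == p.2)).any (fun e => !(e == 0)))

def pB (nums : List Int) (limit : Int) (p : Int × Int) : Bool :=
  !(twoSumScan p.2 PySem.Set.empty (PySem.List.slice nums (some p.1) (some (p.1 + limit))))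

theorem aGo_len (nums : List Int) (limit : Int) : ∀ (l : List (Int × Int)),
    (aGo nums limit l).length = l.countP (pA nums limit) := by
  intro l
  induction l with
  | nil => simp [aGo]
  | cons p rest ih =>
      obtain ⟨idx, n⟩ := p
      simp only [aGo, List.countP_cons, pA]
      split_ifs with h
      · simpa using ih
      · simpa using ih

theorem bGo_len (nums : List Int) (limit : Int) : ∀ (t : List Int) (i : Int),
    (bGo nums limit i t).length = (PySem.List.enumerate t i).countP (pB nums limit) := by
  intro t
  induction t with
  | nil => intro i; simp [bGo, PySem.List.enumerate_nil]
  | cons n rest ih =>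
      intro i
      rw [PySem.List.enumerate_cons]
      simp only [bGo, List.countP_cons, pB]
      split_ifs with h
      · simpa using ih (i + 1)
      · simpa using ih (i + 1)

theorem countP_strict {α : Type} (q p : α → Bool) : ∀ (l : List α),
    (∀ x ∈ l, q x = true → p x = true) → (∃ x ∈ l, p x = true ∧ q x = false) →
    l.countP q < l.countP p := by
  intro l
  induction l with
  | nil => rintro _ ⟨x, hx, _⟩; simp at hx
  | cons a rest ih =>
      rintro hmono ⟨x, hx, hpx, hqx⟩
      rw [List.countP_cons, List.countP_cons]
      rcases List.mem_cons.mp hx with rfl | hx'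
      · have hle : rest.countP q ≤ rest.countP p :=
          List.countP_mono_left (fun y hy hq => hmono y (List.mem_cons_of_mem _ hy) hq)
        simp only [hpx, hqx]
        simp
        omega
      · have hlt := ih (fun y hy => hmono y (List.mem_cons_of_mem _ hy)) ⟨x, hx', hpx, hqx⟩
        have hif : (if q a = true then 1 else 0) ≤ (if p a = true then 1 else 0) := by
          by_cases hqa : q a = true
          · simp [hqa, hmono a List.mem_cons_self hqa]
          · simp [hqa]
        omega

theorem pB_le_pA (nums : List Int) (limit : Int) (p : Int × Int) :
    pB nums limit p = true → pA nums limit p = true := by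
  intro h
  have ht : twoSumScan p.2 PySem.Set.empty
      (PySem.List.slice nums (some p.1) (some (p.1 + limit))) = false := by
    cases hb : twoSumScan p.2 PySem.Set.empty
        (PySem.List.slice nums (some p.1) (some (p.1 + limit))) with
    | false => rfl
    | true =>
        exfalso
        have h' : (!twoSumScan p.2 PySem.Set.empty
            (PySem.List.slice nums (some p.1) (some (p.1 + limit)))) = true := h
        rw [hb] at h'
        simp at h'
  simp only [pA, filter_any_eq]
  rw [← twoSumScan_empty, ht]
  simp

-- ===== VERDICT (by name: the statements are the Claim_ definitions above) =====
theorem search_invalid_numbers_spec : Claim_unchanged_search_invalid_numbers := by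
  intro nums limit _ hnd
  unfold search_invalid_numbers search_invalid_numbers_alt
  have : aGo nums limit (PySem.List.enumerate (PySem.List.slice nums (some limit) none) ((0 : ℕ) : Int)) =
      bGo nums limit ((0 : ℕ) : Int) (PySem.List.slice nums (some limit) none) := by
    apply aGo_eq_bGo
    intro k hk hcon
    obtain ⟨h1, h2⟩ := hcon
    rw [Nat.zero_add] at h2
    refine hnd ?_
    unfold D_search_invalid_numbers
    exact ⟨k, hk, h1, (zeroPair_iff _).mp h2⟩
  simpa using this

theorem search_invalid_numbers_changed : Claim_changed_search_invalid_numbers := by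
  unfold Claim_changed_search_invalid_numbers; decide

theorem search_invalid_numbers_tight : Claim_exact_search_invalid_numbers := by
  intro nums limit _ hd heq
  unfold D_search_invalid_numbers at hd
  obtain ⟨k, hk, hz, hpq⟩ := hd
  have hp : zeroPairScan (PySem.List.slice nums (some (k : Int)) (some ((k : Int) + limit))) = true :=
    (zeroPair_iff _).mpr hpq
  have hlen := congrArg List.length heq
  unfold search_invalid_numbers search_invalid_numbers_alt at hlen
  rw [aGo_len, bGo_len] at hlen
  set t := PySem.List.slice nums (some limit) none with ht
  have hw : ((k : Int), (0 : Int)) ∈ PySem.List.enumerate t 0 := by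
    rw [PySem.List.mem_enumerate_iff]
    refine ⟨k, hk, ?_⟩
    have : t[k] = 0 := by rw [← List.getD_eq_getElem t 1 hk, hz]
    simp [this]
  have hpa : pA nums limit ((k : Int), (0 : Int)) = true := by
    simp [pA]
  have hpb : pB nums limit ((k : Int), (0 : Int)) = false := by
    simp only [pB, twoSumScan_empty, Bool.not_eq_false']
    rw [← zeroPair_eq]
    exact hp
  have := countP_strict (pB nums limit) (pA nums limit) (PySem.List.enumerate t 0)
    (fun x _ => pB_le_pA nums limit x) ⟨_, hw, hpa, hpb⟩
  omega
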